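-- pv_equiv track=rewrite | github.com/mmozum/software-engineering-excercise-repository | seer_python/interviewstreet/LuckyNumber.py | buildCache
-- ===== SOURCE A (Python) =====
-- def buildCache(N):
--     table1 = []
--     table2 = []
--
--     for x in range(N):
--         a = 0
--         b = 0
--         while(x > 0):
--             m = x % 10
--             a += m
--             b += m * m
--             x //= 10
--         table1.append(a)
--         table2.append(b)
--
--     return table1,table2
-- ===== SOURCE B (Python) =====
-- def buildCache(N):
--     n = N if N > 0 else 0
--     table1 = [0] * n
--     table2 = [0] * n
--     for x in range(1, n):
--         q = x // 10
--         m = x % 10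
--         table1[x] = table1[q] + m
--         table2[x] = table2[q] + m * m
--     return table1, table2
-- ===== Notes on version B (the rewrite author's own statement) =====
-- stated objective: faster
-- what changed: Replaces the per-element digit-extraction while loop with a dynamic-programming recurrence table[x] = table[x//10] + x%10 (and squared) filled in one pass over preallocated lists.
import Mathlib
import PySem

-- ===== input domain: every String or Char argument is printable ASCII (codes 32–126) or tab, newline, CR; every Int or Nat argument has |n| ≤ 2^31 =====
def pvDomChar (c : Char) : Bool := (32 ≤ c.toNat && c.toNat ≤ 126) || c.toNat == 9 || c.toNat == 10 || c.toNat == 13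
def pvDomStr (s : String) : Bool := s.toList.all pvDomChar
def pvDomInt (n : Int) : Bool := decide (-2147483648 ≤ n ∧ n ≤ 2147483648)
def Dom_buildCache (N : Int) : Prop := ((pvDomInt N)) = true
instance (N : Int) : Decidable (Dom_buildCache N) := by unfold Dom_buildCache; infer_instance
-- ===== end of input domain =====

-- B replaces A's per-element digit-extraction while loop by the one-pass DP
-- recurrence table[x] = table[x // 10] + x % 10 (and squared) on preallocated lists.

-- ===== PORT A =====
-- the inner 'while x > 0' loop of A, carrying the accumulators a, b
def buildCacheWhile (x a b : Int) : Int × Int :=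
  if _hx : x > 0 then
    let m := PySem.Int.mod x 10
    buildCacheWhile (PySem.Int.floordiv x 10) (a + m) (b + m * m)
  else (a, b)
termination_by x.toNat
decreasing_by
  have h10 : (0:Int) < 10 := by omega
  have h1 : PySem.Int.floordiv x 10 < x := by
    rw [PySem.Int.floordiv_lt_iff_lt_mul h10]; omega
  have _h2 : (0:Int) ≤ PySem.Int.floordiv x 10 := by
    rw [PySem.Int.le_floordiv_iff_mul_le h10]; omega
  omega

def buildCache (N : Int) : List Int × List Int :=
  (PySem.List.pyRange 0 N 1).foldl
    (fun t x =>
      let ab := buildCacheWhile x 0 0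
      (t.1 ++ [ab.1], t.2 ++ [ab.2]))
    ([], [])

-- ===== PORT B =====
def buildCache_alt (N : Int) : List Int × List Int :=
  let n : Int := if N > 0 then N else 0
  let init : List Int := PySem.List.pyRepeat [0] n
  (PySem.List.pyRange 1 n 1).foldl
    (fun t x =>
      let q := PySem.Int.floordiv x 10
      let m := PySem.Int.mod x 10
      (PySem.List.pySetD t.1 x (PySem.List.pyGetD t.1 q 0 + m),
       PySem.List.pySetD t.2 x (PySem.List.pyGetD t.2 q 0 + m * m)))
    (init, init)

-- ===== PRECONDITION & SPEC =====
def Spec_buildCache (N : Int) (out : List Int × List Int) : Prop := out = buildCache_alt N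
instance (N : Int) (out : List Int × List Int) : Decidable (Spec_buildCache N out) := by unfold Spec_buildCache; infer_instance

-- ===== CLAIM (what is proved, stated in full; the proofs are below) =====
def Claim_equal_buildCache : Prop := ∀ (N : Int), Dom_buildCache N → Spec_buildCache N (buildCache N)

-- ===== LEMMAS AND PROOFS =====

-- digit sum and digit-square sum of a natural number
def dsum (x : Nat) : Int :=
  if h : x = 0 then 0 else dsum (x / 10) + ((x % 10 : Nat) : Int)
decreasing_by exact Nat.div_lt_self (Nat.pos_of_ne_zero h) (by omega)

def dsq (x : Nat) : Int :=
  if h : x = 0 then 0 else dsq (x / 10) + ((x % 10 : Nat) : Int) ^ 2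
decreasing_by exact Nat.div_lt_self (Nat.pos_of_ne_zero h) (by omega)

lemma floordiv10_natCast (x : Nat) :
    PySem.Int.floordiv (x : Int) 10 = ((x / 10 : Nat) : Int) := by
  exact_mod_cast PySem.Int.floordiv_natCast x 10

lemma mod10_natCast (x : Nat) :
    PySem.Int.mod (x : Int) 10 = ((x % 10 : Nat) : Int) := by
  exact_mod_cast PySem.Int.mod_natCast x 10

lemma buildCacheWhile_eq (x : Nat) : ∀ (a b : Int),
    buildCacheWhile (x : Int) a b = (a + dsum x, b + dsq x) := by
  induction x using Nat.strong_induction_on with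
  | _ x ih =>
    intro a b
    rw [buildCacheWhile]
    by_cases hx : x = 0
    · subst hx; simp [dsum, dsq]
    · have hpos : ((x:Int) > 0) := by positivity
      simp only [hpos, dif_pos, mod10_natCast, floordiv10_natCast]
      rw [ih (x / 10) (Nat.div_lt_self (Nat.pos_of_ne_zero hx) (by omega))]
      conv_rhs => rw [dsum, dsq]
      simp only [hx, dif_neg, not_false_iff]
      simp only [Prod.mk.injEq]
      constructor <;> push_cast <;> ring

lemma buildCache_fold (l : List Int) : ∀ (t1 t2 : List Int),
    l.foldl (fun t x =>
        let ab := buildCacheWhile x 0 0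
        (t.1 ++ [ab.1], t.2 ++ [ab.2])) (t1, t2)
      = (t1 ++ l.map (fun x => (buildCacheWhile x 0 0).1),
         t2 ++ l.map (fun x => (buildCacheWhile x 0 0).2)) := by
  induction l with
  | nil => simp
  | cons x l ih => intro t1 t2; simp [List.foldl_cons, ih]

lemma buildCache_eq (N : Int) :
    buildCache N = ((List.range N.toNat).map dsum, (List.range N.toNat).map dsq) := by
  unfold buildCache
  rw [buildCache_fold, PySem.List.pyRange_one]
  simp only [Int.sub_zero, List.map_map, List.nil_append, Prod.mk.injEq]
  constructor <;>
  · apply List.map_congr_left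
    intro k _
    simp [Function.comp_apply, buildCacheWhile_eq k 0 0]

-- the B-side table after processing 1..m: entries ≤ m are final, the rest still 0
def gtab (f : Nat → Int) (m i : Nat) : Int := if i ≤ m then f i else 0

lemma replicate_eq_gtab (f : Nat → Int) (n : Nat) (hf : f 0 = 0) :
    List.replicate n (0 : Int) = (List.range n).map (gtab f 0) := by
  apply List.ext_getElem
  · simp
  · intro i h1 h2
    simp only [List.getElem_replicate, List.getElem_map, List.getElem_range]
    unfold gtab
    by_cases hi : i = 0
    · subst hi; simp [hf]
    · simp [hi]

lemma set_map_range (f : Nat → Int) (n m : Nat) :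
    (((List.range n).map (gtab f m)).set (m + 1) (f (m + 1)))
      = (List.range n).map (gtab f (m + 1)) := by
  apply List.ext_getElem
  · simp
  · intro i h1 h2
    simp only [List.getElem_set, List.getElem_map, List.getElem_range]
    unfold gtab
    by_cases hi : m + 1 = i
    · subst hi; simp
    · have h' : (i ≤ m + 1) ↔ (i ≤ m) := by omega
      simp [hi, h']

lemma buildCache_alt_inv (n : Nat) : ∀ (m : Nat), m < n →
    (PySem.List.pyRange 1 (1 + (m : Int)) 1).foldl
      (fun t x =>
        (PySem.List.pySetD t.1 x
          (PySem.List.pyGetD t.1 (PySem.Int.floordiv x 10) 0 + PySem.Int.mod x 10),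
         PySem.List.pySetD t.2 x
          (PySem.List.pyGetD t.2 (PySem.Int.floordiv x 10) 0
            + PySem.Int.mod x 10 * PySem.Int.mod x 10)))
      (List.replicate n 0, List.replicate n 0)
    = ((List.range n).map (gtab dsum m), (List.range n).map (gtab dsq m)) := by
  intro m
  induction m with
  | zero =>
    intro _
    rw [PySem.List.pyRange_one_eq_nil (by omega)]
    simp only [List.foldl_nil]
    simp only [Prod.mk.injEq]
    exact ⟨replicate_eq_gtab dsum n (by simp [dsum]) ▸ rfl,
           replicate_eq_gtab dsq n (by simp [dsq]) ▸ rfl⟩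
  | succ m ih =>
    intro hm
    have h1m : (1:Int) + ((m + 1 : Nat) : Int) = (1 + (m:Int)) + 1 := by push_cast; ring
    rw [h1m, PySem.List.pyRange_one_succ_right (by omega), List.foldl_append,
        ih (by omega)]
    simp only [List.foldl_cons, List.foldl_nil]
    have hx : (1 : Int) + (m : Int) = ((m + 1 : Nat) : Int) := by push_cast; ring
    rw [hx]
    have hq : (m + 1) / 10 ≤ m := by
      have := Nat.div_lt_self (Nat.succ_pos m) (by omega : 1 < 10)
      omega
    have hqn : (m + 1) / 10 < n := by omega
    rw [floordiv10_natCast (m + 1), mod10_natCast (m + 1)]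
    simp only [PySem.List.pyGetD_natCast, PySem.List.pySetD_natCast]
    rw [PySem.List.getD_map_range (gtab dsum m) n ((m+1)/10) 0 hqn,
        PySem.List.getD_map_range (gtab dsq m) n ((m+1)/10) 0 hqn]
    have hg : gtab dsum m ((m + 1) / 10) = dsum ((m + 1) / 10) := by
      unfold gtab; simp [hq]
    have hg2 : gtab dsq m ((m + 1) / 10) = dsq ((m + 1) / 10) := by
      unfold gtab; simp [hq]
    rw [hg, hg2]
    have hds : dsum ((m + 1) / 10) + (((m + 1) % 10 : Nat) : Int) = dsum (m + 1) := by
      conv_rhs => rw [dsum]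
      simp
    have hds2 : dsq ((m + 1) / 10) + (((m + 1) % 10 : Nat) : Int) * (((m + 1) % 10 : Nat) : Int)
        = dsq (m + 1) := by
      conv_rhs => rw [dsq]
      simp [pow_two]
    rw [hds, hds2, set_map_range dsum n m, set_map_range dsq n m]

lemma buildCache_alt_eq (N : Int) :
    buildCache_alt N = ((List.range N.toNat).map dsum, (List.range N.toNat).map dsq) := by
  simp only [buildCache_alt, PySem.List.pyRepeat_singleton]
  by_cases hN : N > 0
  · simp only [hN, if_pos]
    have hn : N = 1 + ((N.toNat - 1 : Nat) : Int) := by omega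
    have hrange : PySem.List.pyRange 1 N 1
        = PySem.List.pyRange 1 (1 + ((N.toNat - 1 : Nat) : Int)) 1 := by rw [← hn]
    rw [hrange, buildCache_alt_inv N.toNat (N.toNat - 1) (by omega)]
    simp only [Prod.mk.injEq]
    constructor <;>
    · apply List.map_congr_left
      intro k hk
      simp only [List.mem_range] at hk
      unfold gtab
      simp [(by omega : k ≤ N.toNat - 1)]
  · simp only [hN]
    rw [PySem.List.pyRange_one_eq_nil (by omega)]
    have h0 : N.toNat = 0 := by omega
    simp [h0]

-- ===== VERDICT (by name: the statement is the Claim_ definition above) =====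
theorem buildCache_spec : Claim_equal_buildCache := by
  intro N _
  unfold Spec_buildCache
  rw [buildCache_eq, buildCache_alt_eq]
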